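-- pv_equiv track=rewrite | github.com/dobermanch/dev-quests | src/python/challenges/problems/online_stock_span_test.py | Solution
-- ===== SOURCE A (Python) =====
-- def Solution(commands: list[int], values: list[list[int]]) -> list[int]:
--     result = []
--
--     spanner: StockSpanner = None
--     for i, command in enumerate(commands):
--         if command == "StockSpanner":
--             spanner = StockSpanner()
--             result.append(None)
--             continue
--
--         if command == "next":
--             result.append(spanner.next(values[i][0]))
--
--     return result
--
-- class StockSpanner:
--
--     def __init__(self):
--         self._stack = []
--
--     def next(self, price: int) -> int:
--         count = 1
--         while self._stack and self._stack[-1][1] <= price: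
--             count += self._stack.pop()[0]
--
--         self._stack.append((count, price))
--
--         return count
-- ===== SOURCE B (Python) =====
-- def Solution(commands: list[int], values: list[list[int]]) -> list[int]:
--     # Stateless: no StockSpanner object at all.  Each "next" recomputes its
--     # span directly from the command/value history by scanning backward,
--     # counting consecutive earlier "next" prices <= price, stopping at the
--     # first strictly greater price or at the most recent "StockSpanner".
--     result = []
--     for i, command in enumerate(commands):
--         if command == "StockSpanner":
--             result.append(None)
--         elif command == "next":
--             price = values[i][0]
--             span = 1
--             j = i - 1
--             while j >= 0 and commands[j] != "StockSpanner":
--                 if commands[j] == "next":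
--                     if values[j][0] > price:
--                         break
--                     span += 1
--                 j -= 1
--             result.append(span)
--     return result
-- ===== Notes on version B (the rewrite author's own statement) =====
-- stated objective: alternative
-- what changed: Removed the StockSpanner class and its monotonic stack entirely: B is stateless and recomputes each span on demand by scanning the command/value history backward from the current index to the most recent 'StockSpanner', counting consecutive earlier prices <= price.
import Mathlib
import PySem

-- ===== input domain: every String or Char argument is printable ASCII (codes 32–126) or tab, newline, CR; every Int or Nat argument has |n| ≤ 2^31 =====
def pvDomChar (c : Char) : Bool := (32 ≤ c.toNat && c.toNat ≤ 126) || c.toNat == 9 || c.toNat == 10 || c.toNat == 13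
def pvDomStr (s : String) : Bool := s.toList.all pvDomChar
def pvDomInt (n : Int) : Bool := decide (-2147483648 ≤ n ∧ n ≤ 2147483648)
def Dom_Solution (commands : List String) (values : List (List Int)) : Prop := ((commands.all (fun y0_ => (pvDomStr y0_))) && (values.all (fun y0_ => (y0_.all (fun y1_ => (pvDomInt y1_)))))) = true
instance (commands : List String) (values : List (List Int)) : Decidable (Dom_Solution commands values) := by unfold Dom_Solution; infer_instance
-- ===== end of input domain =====

-- B removes the StockSpanner class/stack entirely and recomputes each span by a
-- backward scan of the command/value history (alternative decomposition, not faster).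
-- Equivalence is about return values; A mutates only its internal spanner state.

-- values[i][0] (pyGet? = none means Python raises IndexError; excluded by Pre_)
def pvPriceAt (values : List (List Int)) (j : Nat) : Int :=
  ((PySem.List.pyGet? values (j : Int)).bind (fun r => PySem.List.pyGet? r (0 : Int))).getD 0

-- ===== PORT A =====
-- Python list used as a stack (append/pop at the end): TOP = HEAD of the Lean list.

-- the `while self._stack and self._stack[-1][1] <= price: count += self._stack.pop()[0]` loop
def popA (count : Int) (stack : List (Int × Int)) (price : Int) : Int × List (Int × Int) :=
  match stack with
  | [] => (count, [])
  | (c, p) :: rest => if p ≤ price then popA (count + c) rest price else (count, (c, p) :: rest)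

-- StockSpanner.next : returns (result, new stack)
def nextA (stack : List (Int × Int)) (price : Int) : Int × List (Int × Int) :=
  let r := popA 1 stack price
  (r.1, (r.1, price) :: r.2)

-- the driver loop of A; spanner = none models Python's `spanner = None`
def loopA (cmds : List String) (i : Nat) (values : List (List Int))
    (sp : Option (List (Int × Int))) (res : List (Option Int)) : List (Option Int) :=
  match cmds with
  | [] => res
  | cmd :: rest =>
    if cmd = "StockSpanner" then loopA rest (i + 1) values (some []) (res ++ [none])
    else if cmd = "next" then
      match sp with
      | some st =>
        let r := nextA st (pvPriceAt values i)
        loopA rest (i + 1) values (some r.2) (res ++ [some r.1])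
      | none => loopA rest (i + 1) values none res  -- Python raises AttributeError here (excluded by Pre_)
    else loopA rest (i + 1) values sp res

def Solution (commands : List String) (values : List (List Int)) : List (Option Int) :=
  loopA commands 0 values none []

-- ===== PORT B =====
-- B is stateless: `while j >= 0 and commands[j] != "StockSpanner"` backward scan,
-- counting earlier "next" prices <= price, breaking at the first strictly greater one.
def spanBack (cmds : List String) (vals : List (List Int)) (price : Int) : Nat → Int
  | 0 => 0
  | j + 1 =>
    if cmds.getD j "" = "StockSpanner" then 0
    else if cmds.getD j "" = "next" then
      if price < pvPriceAt vals j then 0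
      else 1 + spanBack cmds vals price j
    else spanBack cmds vals price j

-- B's `for i, command in enumerate(commands)` loop, building the result front-to-back
def buildB (cmds : List String) (vals : List (List Int)) : Nat → List String → List (Option Int)
  | _, [] => []
  | i, cmd :: rest =>
    if cmd = "StockSpanner" then none :: buildB cmds vals (i + 1) rest
    else if cmd = "next" then
      some (1 + spanBack cmds vals (pvPriceAt vals i) i) :: buildB cmds vals (i + 1) rest
    else buildB cmds vals (i + 1) rest

def Solution_alt (commands : List String) (values : List (List Int)) : List (Option Int) :=
  buildB commands values 0 commands

-- ===== PRECONDITION & SPEC =====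
-- Pre_ = exactly the inputs on which Python A returns: every "next" command is preceded
-- by a "StockSpanner" (else AttributeError) and has a nonempty values[i] (else IndexError).
def Pre_Solution (commands : List String) (values : List (List Int)) : Prop :=
  ∀ i, i < commands.length → commands.getD i "" = "next" →
    (∃ j, j < i ∧ commands.getD j "" = "StockSpanner") ∧
    i < values.length ∧ values.getD i [] ≠ []
instance (commands : List String) (values : List (List Int)) : Decidable (Pre_Solution commands values) := by
  unfold Pre_Solution; infer_instance
def pvWitness_Solution : List String × List (List Int) :=
  (["StockSpanner", "next", "next"], [[], [3], [2]])
def Spec_Solution (commands : List String) (values : List (List Int)) (out : List (Option Int)) : Prop := out = Solution_alt commands values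
instance (commands : List String) (values : List (List Int)) (out : List (Option Int)) : Decidable (Spec_Solution commands values out) := by unfold Spec_Solution; infer_instance

-- ===== CLAIM (what is proved, stated in full; the proofs are below) =====
def Claim_equal_Solution : Prop := ∀ (commands : List String) (values : List (List Int)), Dom_Solution commands values → Pre_Solution commands values → Spec_Solution commands values (Solution commands values)

-- ===== LEMMAS AND PROOFS =====

-- proof-only mirror of B's inner scan: countLe over the explicit price history
def countLe (prices : List Int) (price : Int) : Int :=
  match prices with
  | [] => 0
  | q :: rest => if q ≤ price then 1 + countLe rest price else 0

-- the prices seen since the most recent "StockSpanner" before index j, most recent first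
def pricesBack (cmds : List String) (vals : List (List Int)) : Nat → List Int
  | 0 => []
  | j + 1 =>
    if cmds.getD j "" = "StockSpanner" then []
    else if cmds.getD j "" = "next" then pvPriceAt vals j :: pricesBack cmds vals j
    else pricesBack cmds vals j

theorem spanBack_eq_countLe (cmds : List String) (vals : List (List Int)) (price : Int) :
    ∀ j, spanBack cmds vals price j = countLe (pricesBack cmds vals j) price := by
  intro j
  induction j with
  | zero => simp [spanBack, pricesBack, countLe]
  | succ j ih =>
    by_cases h1 : cmds.getD j "" = "StockSpanner"
    · rw [List.getD_eq_getElem?_getD] at h1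
      simp [spanBack, pricesBack, List.getD_eq_getElem?_getD, h1, countLe]
    · rw [List.getD_eq_getElem?_getD] at h1
      by_cases h2 : cmds.getD j "" = "next"
      · rw [List.getD_eq_getElem?_getD] at h2
        by_cases h3 : price < pvPriceAt vals j
        · simp [spanBack, pricesBack, List.getD_eq_getElem?_getD, h2, h3, countLe, not_le.mpr h3]
        · simp [spanBack, pricesBack, List.getD_eq_getElem?_getD, h2, h3, countLe, not_lt.mp h3, ih]
      · rw [List.getD_eq_getElem?_getD] at h2
        simp [spanBack, pricesBack, List.getD_eq_getElem?_getD, h1, h2, ih]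

-- relation between A's stack and the price history: each stack entry (c, p) stands for a
-- block of c prices whose most recent element is p and whose older elements are all ≤ p.
inductive StInv : List (Int × Int) → List Int → Prop
  | nil : StInv [] []
  | cons (c p : Int) (blk : List Int) (rest : List (Int × Int)) (prs : List Int)
      (hc : c = (blk.length : Int) + 1) (hle : ∀ q ∈ blk, q ≤ p) (h : StInv rest prs) :
      StInv ((c, p) :: rest) (p :: (blk ++ prs))

theorem countLe_append_le (blk : List Int) (prs : List Int) (price : Int)
    (h : ∀ q ∈ blk, q ≤ price) :
    countLe (blk ++ prs) price = (blk.length : Int) + countLe prs price := by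
  induction blk with
  | nil => simp [countLe]
  | cons q t ih =>
    have hq : q ≤ price := h q (by simp)
    have := ih (fun x hx => h x (by simp [hx]))
    simp [countLe, hq, this]
    ring

theorem popA_count (st : List (Int × Int)) (pr : List Int) (hinv : StInv st pr)
    (price : Int) : ∀ k, (popA k st price).1 = k + countLe pr price := by
  induction hinv with
  | nil => intro k; simp [popA, countLe]
  | cons c p blk rest prs hc hle h ih =>
    intro k
    by_cases hp : p ≤ price
    · have hblk : ∀ q ∈ blk, q ≤ price := fun q hq => le_trans (hle q hq) hp
      simp [popA, hp, countLe, ih, countLe_append_le blk prs price hblk, hc]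
      ring
    · simp [popA, hp, countLe]

theorem popA_state (st : List (Int × Int)) (pr : List Int) (hinv : StInv st pr)
    (price : Int) : ∀ k, ∃ blk restPr,
    pr = blk ++ restPr ∧ (∀ q ∈ blk, q ≤ price) ∧
    countLe pr price = (blk.length : Int) ∧ StInv (popA k st price).2 restPr := by
  induction hinv with
  | nil => intro k; exact ⟨[], [], by simp, by simp, by simp [countLe], by simp only [popA]; exact StInv.nil⟩
  | cons c p blk rest prs hc hle h ih =>
    intro k
    by_cases hp : p ≤ price
    · obtain ⟨blk', restPr, hpr, hle', hcnt, hinv'⟩ := ih (k + c)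
      refine ⟨p :: (blk ++ blk'), restPr, ?_, ?_, ?_, ?_⟩
      · simp [hpr]
      · intro q hq
        rcases List.mem_cons.mp hq with h1 | h1
        · exact h1 ▸ hp
        · rcases List.mem_append.mp h1 with h2 | h2
          · exact le_trans (hle q h2) hp
          · exact hle' q h2
      · have hblk : ∀ q ∈ blk, q ≤ price := fun q hq => le_trans (hle q hq) hp
        simp [countLe, hp, countLe_append_le blk prs price hblk, hcnt]
        ring
      · simpa [popA, hp] using hinv'
    · refine ⟨[], p :: (blk ++ prs), by simp, by simp, by simp [countLe, hp], ?_⟩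
      simp only [popA, if_neg hp]
      exact StInv.cons c p blk rest prs hc hle h

-- invariant carried by the driver comparison: either no spanner yet (and no
-- "StockSpanner" appears in the prefix), or A's stack matches the price history.
theorem loop_eq (full : List String) (vals : List (List Int)) (hpre : Pre_Solution full vals) :
    ∀ (suffix : List String) (i : Nat), full.drop i = suffix →
    ∀ (spA : Option (List (Int × Int))) (res : List (Option Int)),
    (spA = none ∧ (∀ j, j < i → full.getD j "" ≠ "StockSpanner")
      ∨ ∃ st, spA = some st ∧ StInv st (pricesBack full vals i)) →
    loopA suffix i vals spA res = res ++ buildB full vals i suffix := by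
  intro suffix
  induction suffix with
  | nil => intro i _ spA res _; simp [loopA, buildB]
  | cons cmd rest ih =>
    intro i hdrop spA res hrel
    have hi : i < full.length := by
      by_contra h
      simp [List.drop_eq_nil_of_le (Nat.le_of_not_lt h)] at hdrop
    have hcons : full.drop i = full[i] :: full.drop (i + 1) :=
      List.drop_eq_getElem_cons hi
    rw [hdrop] at hcons
    have hcmd : full.getD i "" = cmd := by
      rw [List.getD_eq_getElem _ _ hi]; exact (List.cons.injEq .. ▸ hcons).1.symm
    have hrest : full.drop (i + 1) = rest := ((List.cons.injEq .. ▸ hcons).2).symm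
    have hcmd' : full[i]?.getD "" = cmd := by rw [← List.getD_eq_getElem?_getD]; exact hcmd
    by_cases h1 : cmd = "StockSpanner"
    · have hpb : pricesBack full vals (i + 1) = [] := by
        simp [pricesBack, hcmd', h1]
      have := ih (i + 1) hrest (some []) (res ++ [none])
        (Or.inr ⟨[], rfl, hpb ▸ StInv.nil⟩)
      simp [loopA, buildB, h1, this]
    · by_cases h2 : cmd = "next"
      · subst h2
        rcases hrel with ⟨ha, hnone⟩ | ⟨st, ha, hinv⟩
        · -- contradiction with Pre_: this "next" has a prior "StockSpanner"
          obtain ⟨⟨j, hj, hjs⟩, _, _⟩ := hpre i hi hcmd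
          exact absurd hjs (hnone j hj)
        · subst ha
          have hpb : pricesBack full vals (i + 1)
              = pvPriceAt vals i :: pricesBack full vals i := by
            simp [pricesBack, hcmd', h1]
          set price := pvPriceAt vals i with hp
          have hres : (nextA st price).1 = 1 + countLe (pricesBack full vals i) price := by
            simpa [nextA] using popA_count st _ hinv price 1
          obtain ⟨blk, restPr, hpr, hle, hcnt, hinv'⟩ := popA_state st _ hinv price 1
          have hinvNew : StInv (nextA st price).2 (pricesBack full vals (i + 1)) := by
            rw [hpb, hpr]
            show StInv (((popA 1 st price).1, price) :: (popA 1 st price).2) _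
            exact StInv.cons _ price blk _ restPr
              (by rw [show (popA 1 st price).1 = (nextA st price).1 from rfl, hres, hcnt]; ring)
              hle hinv'
          have hstep : loopA ("next" :: rest) i vals (some st) res
              = loopA rest (i + 1) vals (some (nextA st price).2)
                  (res ++ [some (nextA st price).1]) := rfl
          have hb : buildB full vals i ("next" :: rest)
              = some (1 + spanBack full vals price i) :: buildB full vals (i + 1) rest := rfl
          rw [hstep, ih (i + 1) hrest _ _ (Or.inr ⟨_, rfl, hinvNew⟩), hb,
            hres, spanBack_eq_countLe]
          simp
      · have hinv' : (spA = none ∧ (∀ j, j < i + 1 → full.getD j "" ≠ "StockSpanner")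
            ∨ ∃ st, spA = some st ∧ StInv st (pricesBack full vals (i + 1))) := by
          have hpb : pricesBack full vals (i + 1) = pricesBack full vals i := by
            simp [pricesBack, hcmd', h1, h2]
          rcases hrel with ⟨ha, hnone⟩ | ⟨st, ha, hinv⟩
          · refine Or.inl ⟨ha, fun j hj => ?_⟩
            rcases Nat.lt_succ_iff_lt_or_eq.mp hj with h | h
            · exact hnone j h
            · subst h; rw [hcmd]; exact h1
          · exact Or.inr ⟨st, ha, hpb ▸ hinv⟩
        have := ih (i + 1) hrest spA res hinv'
        simp [loopA, buildB, h1, h2, this]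

-- ===== VERDICT (by name: the statement is the Claim_ definition above) =====
theorem Solution_spec : Claim_equal_Solution := by
  intro commands values _ hpre
  unfold Spec_Solution Solution Solution_alt
  exact loop_eq commands values hpre commands 0 rfl none []
    (Or.inl ⟨rfl, fun j hj => absurd hj (Nat.not_lt_zero j)⟩)
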